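-- pv_equiv track=rewrite | github.com/CHENLENGGROUP/happy_farm | system_logic/po/WebProductAnalysisPO.py | handle_scatterplot_info
-- ===== SOURCE A (Python) =====
-- def handle_scatterplot_info(each_price_sale_list, product_type_list, condition_list):
--
--     scatterplot_nor, scatterplot_sup, scatterplot_ele = [],[],[]
--
--     for i in range(0,len(each_price_sale_list)):
--         temp_list = []
--         for j in range(0, len(each_price_sale_list[i])):
--             temp_dict = {
--                 'y':each_price_sale_list[i][j],
--                 'r':10
--             }
--             try:
--                 temp_dict['x'] = condition_list[j]['product_price<=']
--             except:
--                 temp_dict['x'] = condition_list[j]['product_price>'] + 100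
--             temp_list.append(temp_dict)
--         if product_type_list[i]['product_type'] == 0:
--             scatterplot_nor = temp_list
--         elif product_type_list[i]['product_type'] == 1:
--             scatterplot_sup = temp_list
--         else:
--             scatterplot_ele = temp_list
--
--     return scatterplot_nor, scatterplot_sup, scatterplot_ele
-- ===== SOURCE B (Python) =====
-- def price_x(cond):
--     try:
--         return cond['product_price<=']
--     except KeyError:
--         return cond['product_price>'] + 100
--
--
-- def handle_scatterplot_info(each_price_sale_list, product_type_list, condition_list):
--     needed = max(map(len, each_price_sale_list), default=0)
--     xs = [price_x(cond) for cond in condition_list[:needed]]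
--     scatterplot_nor, scatterplot_sup, scatterplot_ele = [], [], []
--     for prices, info in zip(each_price_sale_list, product_type_list):
--         temp_list = [{'y': y, 'r': 10, 'x': x} for y, x in zip(prices, xs)]
--         if info['product_type'] == 0:
--             scatterplot_nor = temp_list
--         elif info['product_type'] == 1:
--             scatterplot_sup = temp_list
--         else:
--             scatterplot_ele = temp_list
--     return scatterplot_nor, scatterplot_sup, scatterplot_ele
-- ===== Notes on version B (the rewrite author's own statement) =====
-- stated objective: simpler
-- what changed: B computes the x-price of each needed condition once into a table and pairs it with each product's prices by zip in a single forward loop, replacing A's nested index loops that redo the try/except lookup for every single data point.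
import Mathlib
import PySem

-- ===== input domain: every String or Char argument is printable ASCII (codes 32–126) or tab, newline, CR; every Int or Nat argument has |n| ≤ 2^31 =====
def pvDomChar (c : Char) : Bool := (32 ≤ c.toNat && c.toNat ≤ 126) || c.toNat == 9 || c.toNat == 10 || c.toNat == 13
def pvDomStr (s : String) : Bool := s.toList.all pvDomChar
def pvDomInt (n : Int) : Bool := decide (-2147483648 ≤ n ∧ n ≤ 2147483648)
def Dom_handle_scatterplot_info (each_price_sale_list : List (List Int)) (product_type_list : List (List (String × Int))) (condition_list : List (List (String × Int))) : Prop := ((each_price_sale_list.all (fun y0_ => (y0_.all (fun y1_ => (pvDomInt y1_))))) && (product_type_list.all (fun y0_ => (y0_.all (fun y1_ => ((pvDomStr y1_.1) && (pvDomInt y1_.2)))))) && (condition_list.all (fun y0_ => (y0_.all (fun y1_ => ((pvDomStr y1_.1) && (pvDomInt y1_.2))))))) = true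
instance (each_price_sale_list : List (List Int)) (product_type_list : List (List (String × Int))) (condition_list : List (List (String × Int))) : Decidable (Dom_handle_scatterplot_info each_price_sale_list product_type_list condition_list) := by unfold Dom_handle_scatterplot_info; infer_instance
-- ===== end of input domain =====

-- B computes the x-price of each needed condition once into a table and zips it with each
-- product's prices in one forward loop, instead of A's nested index loops redoing the
-- try/except lookup per point; objective: simpler, same cost.

-- ===== PORT A =====
-- A's try/except value for temp_dict['x'] at index j (defaults outside Pre_, where Python raises)
def pvAx (condition_list : List (List (String × Int))) (j : Int) : Int :=
  match (PySem.Dict.mk ((PySem.List.pyGet? condition_list j).getD [])).get? "product_price<=" with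
  | some v => v
  | none => ((PySem.Dict.mk ((PySem.List.pyGet? condition_list j).getD [])).get? "product_price>").getD 0 + 100

-- the temp_dict built for inner index j (keys in insertion order y, r, x)
def pvDictA (row : List Int) (condition_list : List (List (String × Int))) (j : Int) : List (String × Int) :=
  ((PySem.Dict.mk [("y", (PySem.List.pyGet? row j).getD 0), ("r", 10)]).insert "x" (pvAx condition_list j)).items

-- the inner for-j loop building temp_list
def pvTempA (row : List Int) (condition_list : List (List (String × Int))) : List (List (String × Int)) :=
  (PySem.List.pyRange 0 row.length 1).foldl (fun acc j => acc ++ [pvDictA row condition_list j]) []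

def handle_scatterplot_info (each_price_sale_list : List (List Int)) (product_type_list : List (List (String × Int))) (condition_list : List (List (String × Int))) : (List (List (String × Int))) × (List (List (String × Int))) × (List (List (String × Int))) :=
  (PySem.List.pyRange 0 each_price_sale_list.length 1).foldl
    (fun s i =>
      let temp_list := pvTempA ((PySem.List.pyGet? each_price_sale_list i).getD []) condition_list
      let pt := ((PySem.Dict.mk ((PySem.List.pyGet? product_type_list i).getD [])).get? "product_type").getD 0
      if pt = 0 then (temp_list, s.2.1, s.2.2)
      else if pt = 1 then (s.1, temp_list, s.2.2)
      else (s.1, s.2.1, temp_list))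
    ([], [], [])

-- ===== PORT B =====
-- B's price_x helper (KeyError cases default outside Pre_)
def pvCondX (cond : List (String × Int)) : Int :=
  match (PySem.Dict.mk cond).get? "product_price<=" with
  | some v => v
  | none => ((PySem.Dict.mk cond).get? "product_price>").getD 0 + 100

def handle_scatterplot_info_alt (each_price_sale_list : List (List Int)) (product_type_list : List (List (String × Int))) (condition_list : List (List (String × Int))) : (List (List (String × Int))) × (List (List (String × Int))) × (List (List (String × Int))) :=
  let needed := (each_price_sale_list.map List.length).foldl max 0
  let xs := (PySem.List.slice condition_list none (some (needed : Int))).map pvCondX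
  (each_price_sale_list.zip product_type_list).foldl
    (fun s p =>
      let temp_list := (p.1.zip xs).map (fun q => [("y", q.1), ("r", 10), ("x", q.2)])
      let pt := ((PySem.Dict.mk p.2).get? "product_type").getD 0
      if pt = 0 then (temp_list, s.2.1, s.2.2)
      else if pt = 1 then (s.1, temp_list, s.2.2)
      else (s.1, s.2.1, temp_list))
    ([], [], [])

-- ===== PRECONDITION & SPEC =====
-- Pre_: exactly the inputs where Python A returns — every processed row fits inside
-- condition_list, each touched condition dict has one of the two price keys, and each
-- product has a 'product_type' entry (otherwise A raises IndexError/KeyError).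
def Pre_handle_scatterplot_info (each_price_sale_list : List (List Int)) (product_type_list : List (List (String × Int))) (condition_list : List (List (String × Int))) : Prop :=
  ∀ i, i < each_price_sale_list.length →
    (each_price_sale_list.getD i []).length ≤ condition_list.length ∧
    i < product_type_list.length ∧
    ((PySem.Dict.mk (product_type_list.getD i [])).get? "product_type").isSome = true ∧
    ∀ j, j < (each_price_sale_list.getD i []).length →
      (((PySem.Dict.mk (condition_list.getD j [])).get? "product_price<=").isSome
        || ((PySem.Dict.mk (condition_list.getD j [])).get? "product_price>").isSome) = true
instance (each_price_sale_list : List (List Int)) (product_type_list : List (List (String × Int))) (condition_list : List (List (String × Int))) : Decidable (Pre_handle_scatterplot_info each_price_sale_list product_type_list condition_list) := by unfold Pre_handle_scatterplot_info; infer_instance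

def pvWitness_handle_scatterplot_info : List (List Int) × (List (List (String × Int))) × (List (List (String × Int))) :=
  ([[5, 6]], [[("product_type", 0)]], [[("product_price<=", 3)], [("product_price>", 7)]])

def Spec_handle_scatterplot_info (each_price_sale_list : List (List Int)) (product_type_list : List (List (String × Int))) (condition_list : List (List (String × Int))) (out : (List (List (String × Int))) × (List (List (String × Int))) × (List (List (String × Int)))) : Prop := out = handle_scatterplot_info_alt each_price_sale_list product_type_list condition_list
instance (each_price_sale_list : List (List Int)) (product_type_list : List (List (String × Int))) (condition_list : List (List (String × Int))) (out : (List (List (String × Int))) × (List (List (String × Int))) × (List (List (String × Int)))) : Decidable (Spec_handle_scatterplot_info each_price_sale_list product_type_list condition_list out) := by unfold Spec_handle_scatterplot_info; infer_instance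

-- ===== CLAIM (what is proved, stated in full; the proofs are below) =====
def Claim_equal_handle_scatterplot_info : Prop := ∀ (each_price_sale_list : List (List Int)) (product_type_list : List (List (String × Int))) (condition_list : List (List (String × Int))), Dom_handle_scatterplot_info each_price_sale_list product_type_list condition_list → Pre_handle_scatterplot_info each_price_sale_list product_type_list condition_list → Spec_handle_scatterplot_info each_price_sale_list product_type_list condition_list (handle_scatterplot_info each_price_sale_list product_type_list condition_list)

-- ===== LEMMAS AND PROOFS =====

theorem pv_foldl_max_ge (l : List Nat) (a : Nat) : a ≤ l.foldl max a := by
  induction l generalizing a with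
  | nil => simp
  | cons y ys ih => exact le_trans (Nat.le_max_left a y) (ih (max a y))

theorem pv_le_foldl_max (l : List Nat) (a x : Nat) (hx : x ∈ l) : x ≤ l.foldl max a := by
  induction l generalizing a with
  | nil => cases hx
  | cons y ys ih =>
    rcases List.mem_cons.mp hx with h | h
    · subst h; exact le_trans (Nat.le_max_right a x) (pv_foldl_max_ge ys (max a x))
    · exact ih (max a y) h

-- inner loop: A's temp_list for a row equals B's zip-map over the precomputed x table
theorem pv_temp_eq (row : List Int) (cl : List (List (String × Int))) (xs : List Int)
    (hclen : xs.length ≤ cl.length)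
    (hxs : ∀ k, (hk : k < xs.length) → xs[k] = pvCondX (cl[k]'(by omega)))
    (hlen : row.length ≤ xs.length) :
    pvTempA row cl = (row.zip xs).map (fun q => [("y", q.1), ("r", 10), ("x", q.2)]) := by
  unfold pvTempA
  rw [PySem.List.foldl_append_singleton_eq_map]
  apply List.ext_getElem
  · simp [PySem.List.length_pyRange_one]
    omega
  · intro k h1 h2
    have hk : k < row.length := by
      simpa [PySem.List.length_pyRange_one] using h1
    have hkx : k < xs.length := by omega
    have hkc : k < cl.length := by omega
    simp only [List.nil_append, List.getElem_map, PySem.List.getElem_pyRange_one, List.getElem_zip]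
    have h0k : (0 : Int) + k = (k : Int) := by omega
    rw [h0k]
    simp [pvDictA, pvAx, pvCondX, PySem.Dict.insert, hk, hkc, hxs k hkx]

-- outer loop: A's index fold equals B's fold over the zipped prefix
theorem pv_outer (epsl : List (List Int)) (ptl : List (List (String × Int)))
    (cl : List (List (String × Int))) (xs : List Int)
    (hrow : ∀ i, i < epsl.length → pvTempA (epsl.getD i []) cl
      = ((epsl.getD i []).zip xs).map (fun q => [("y", q.1), ("r", 10), ("x", q.2)]))
    (hlen : epsl.length ≤ ptl.length) :
    ∀ n, n ≤ epsl.length →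
      (PySem.List.pyRange 0 (n : Int) 1).foldl
        (fun s i =>
          let temp_list := pvTempA ((PySem.List.pyGet? epsl i).getD []) cl
          let pt := ((PySem.Dict.mk ((PySem.List.pyGet? ptl i).getD [])).get? "product_type").getD 0
          if pt = 0 then (temp_list, s.2.1, s.2.2)
          else if pt = 1 then (s.1, temp_list, s.2.2)
          else (s.1, s.2.1, temp_list))
        ([], [], [])
      = ((epsl.zip ptl).take n).foldl
          (fun s p =>
            let temp_list := (p.1.zip xs).map (fun q => [("y", q.1), ("r", 10), ("x", q.2)])
            let pt := ((PySem.Dict.mk p.2).get? "product_type").getD 0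
            if pt = 0 then (temp_list, s.2.1, s.2.2)
            else if pt = 1 then (s.1, temp_list, s.2.2)
            else (s.1, s.2.1, temp_list))
          ([], [], []) := by
  intro n hn
  induction n with
  | zero => rw [PySem.List.pyRange_one_eq_nil (by omega)]; rfl
  | succ n ih =>
    have hne : n < epsl.length := by omega
    have hnp : n < ptl.length := by omega
    have hnz : n < (epsl.zip ptl).length := by simp [List.length_zip]; omega
    have h0 : (0 : Int) ≤ (n : Int) := by omega
    have hcast : ((n + 1 : Nat) : Int) = (n : Int) + 1 := by omega
    rw [hcast, PySem.List.pyRange_one_succ_right h0, List.foldl_append, ih (by omega)]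
    rw [List.take_add_one, List.getElem?_eq_getElem hnz, List.foldl_append]
    simp only [List.foldl_cons, List.foldl_nil, Option.toList_some]
    have hgn : (PySem.List.pyGet? epsl (n : Int)).getD [] = epsl.getD n [] := by
      simp [PySem.List.pyGet?_natCast, List.getD_eq_getElem?_getD]
    have hgp : (PySem.List.pyGet? ptl (n : Int)).getD [] = ptl.getD n [] := by
      simp [PySem.List.pyGet?_natCast, List.getD_eq_getElem?_getD]
    rw [hgn, hgp, hrow n hne]
    simp [List.getElem_zip, List.getD_eq_getElem?_getD, List.getElem?_eq_getElem hne,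
      List.getElem?_eq_getElem hnp]

-- ===== VERDICT (by name: the statement is the Claim_ definition above) =====
theorem handle_scatterplot_info_spec : Claim_equal_handle_scatterplot_info := by
  intro epsl ptl cl _ hpre
  unfold Spec_handle_scatterplot_info handle_scatterplot_info handle_scatterplot_info_alt
  simp only []
  have hlen : epsl.length ≤ ptl.length := by
    by_cases h : epsl.length = 0
    · omega
    · have := (hpre (epsl.length - 1) (by omega)).2.1
      omega
  have htake : (epsl.zip ptl).take epsl.length = epsl.zip ptl := by
    apply List.take_of_length_le
    simp [List.length_zip]
  set m := (epsl.map List.length).foldl max 0 with hm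
  have hsl : PySem.List.slice cl none (some (m : Int)) = cl.take m :=
    PySem.List.slice_to_natCast cl m
  rw [hsl, ← htake]
  set xs := List.map pvCondX (cl.take m) with hxdef
  have hxlen : xs.length = min m cl.length := by simp [hxdef]
  refine pv_outer epsl ptl cl xs (fun i hi => ?_) hlen epsl.length le_rfl
  have h1 : (epsl.getD i []).length ≤ cl.length := (hpre i hi).1
  have h2 : (epsl.getD i []).length ≤ m := by
    apply pv_le_foldl_max
    rw [List.getD_eq_getElem?_getD, List.getElem?_eq_getElem hi]
    exact List.mem_map.mpr ⟨epsl[i], List.getElem_mem hi, rfl⟩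
  refine pv_temp_eq _ _ _ (by omega) (fun k hk => ?_) (by omega)
  have hkm : k < cl.length := by omega
  simp [hxdef, List.getElem_take]
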